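-- pv_equiv track=rewrite | github.com/Hgazibara/coding | codewars/python/4kyu/text_align_justify.py | choose_words
-- ===== SOURCE A (Python) =====
-- def choose_words(words, width):
--     line_length = 0
--     chosen_words = []
--
--     while line_length < width and words:
--         min_length = len(words[0]) + 1 if chosen_words else len(words[0])
--
--         if line_length + min_length > width:
--             break
--
--         word = words.pop(0)
--
--         chosen_words.append(word)
--         line_length += min_length
--
--     return chosen_words
-- ===== SOURCE B (Python) =====
-- def choose_words(words, width):
--     # Prefix-cost table + binary search instead of A's O(n^2) pop(0) loop.
--     # Mutates `words` like A does (removes the chosen leading words).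
--     if width <= 0:
--         return []
--     f = [0]
--     for i, w in enumerate(words):
--         f.append(f[-1] + len(w) + (1 if i > 0 else 0))
--     lo, hi = 0, len(words)
--     while lo < hi:
--         mid = (lo + hi + 1) // 2
--         if f[mid] <= width:
--             lo = mid
--         else:
--             hi = mid - 1
--     chosen = words[:lo]
--     del words[:lo]
--     return chosen
-- ===== Notes on version B (the rewrite author's own statement) =====
-- stated objective: faster
-- what changed: Replaces A's quadratic pop(0)-based greedy loop by a single prefix-cost table build plus a binary search for the largest fitting word count, then one slice (same front-removal mutation of the input list).
import Mathlib
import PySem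

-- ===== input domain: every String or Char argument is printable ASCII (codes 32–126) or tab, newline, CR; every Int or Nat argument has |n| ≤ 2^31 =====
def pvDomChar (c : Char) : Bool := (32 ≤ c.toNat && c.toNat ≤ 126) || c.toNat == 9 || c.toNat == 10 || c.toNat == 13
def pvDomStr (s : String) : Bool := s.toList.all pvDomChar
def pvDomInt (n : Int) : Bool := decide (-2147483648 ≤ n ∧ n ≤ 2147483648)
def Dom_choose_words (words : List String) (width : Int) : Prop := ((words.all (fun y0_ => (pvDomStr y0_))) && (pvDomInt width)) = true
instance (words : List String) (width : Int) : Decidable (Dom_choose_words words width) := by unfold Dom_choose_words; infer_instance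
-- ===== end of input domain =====

-- B replaces A's quadratic pop(0) greedy loop by a prefix-cost table + binary search (asymptotically faster);
-- both Pythons mutate `words` identically (remove the chosen front words); the Lean claim is about the return value.

-- ===== PORT A =====
-- A's while loop: state (remaining words, line_length, chosen_words)
def chooseLoopA (width : Int) : List String → Int → List String → List String
  | [], _, chosen => chosen
  | w :: rest, ll, chosen =>
    if ll < width then
      let minLen : Int := if chosen = [] then PySem.Str.len w else PySem.Str.len w + 1
      if ll + minLen > width then chosen
      else chooseLoopA width rest (ll + minLen) (chosen ++ [w])
    else chosen

def choose_words (words : List String) (width : Int) : List String :=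
  chooseLoopA width words 0 []

-- ===== PORT B =====
-- Source B's table build: f = [0]; for i, w in enumerate(words): f.append(f[-1] + len(w) + (1 if i > 0 else 0))
def cwTable (words : List String) : List Int :=
  (PySem.List.enumerate words).foldl
    (fun f p =>
      f ++ [PySem.List.pyGetD f (-1) 0 + PySem.Str.len p.2 + (if p.1 > 0 then 1 else 0)])
    [0]

-- Source B's binary search: while lo < hi: mid = (lo+hi+1)//2; f[mid] <= width ? lo = mid : hi = mid-1
def cwSearch (f : List Int) (width : Int) (lo hi : Nat) : Nat :=
  if lo < hi then
    let mid := (lo + hi + 1) / 2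
    if PySem.List.pyGetD f (mid : Int) 0 ≤ width then cwSearch f width mid hi
    else cwSearch f width lo (mid - 1)
  else lo
termination_by hi - lo
decreasing_by
  · omega
  · omega

def choose_words_alt (words : List String) (width : Int) : List String :=
  if width ≤ 0 then []
  else
    let f := cwTable words
    let lo := cwSearch f width 0 words.length
    words.take lo     -- words[:lo] (0 ≤ lo ≤ len words)

-- ===== PRECONDITION & SPEC =====
def Spec_choose_words (words : List String) (width : Int) (out : List String) : Prop := out = choose_words_alt words width
instance (words : List String) (width : Int) (out : List String) : Decidable (Spec_choose_words words width out) := by unfold Spec_choose_words; infer_instance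

-- ===== CLAIM (what is proved, stated in full; the proofs are below) =====
def Claim_equal_choose_words : Prop := ∀ (words : List String) (width : Int), Dom_choose_words words width → Spec_choose_words words width (choose_words words width)

-- ===== LEMMAS AND PROOFS =====

-- proof-only helpers
def sumLen (ws : List String) : Int := (ws.map (fun w => PySem.Str.len w)).sum

-- cumulative cost of taking the first k words of the TAIL phase (each costs len+1)
def gsum (t : List String) (k : Nat) : Int := ((t.take k).map (fun w => PySem.Str.len w + 1)).sum

-- cost of a k-word line: sum of lengths + (k-1) separating spaces
def costF (words : List String) (k : Nat) : Int := sumLen (words.take k) + ((k - 1 : Nat) : Int)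

-- the words taken after the first, given remaining budget r
def tailTake (r : Int) : List String → List String
  | [] => []
  | w :: t => if PySem.Str.len w + 1 ≤ r then w :: tailTake (r - (PySem.Str.len w + 1)) t else []

-- mid-level characterization of A
def midA (words : List String) (width : Int) : List String :=
  match words with
  | [] => []
  | w :: t =>
    if 0 < width ∧ PySem.Str.len w ≤ width then w :: tailTake (width - PySem.Str.len w) t else []

-- scan produced by the tail of B's table fold
def scanTail (a : Int) : List String → List Int
  | [] => []
  | w :: t => (a + PySem.Str.len w + 1) :: scanTail (a + PySem.Str.len w + 1) t

theorem strLen_nonneg (w : String) : 0 ≤ PySem.Str.len w := by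
  simp [PySem.Str.len_eq]

theorem gsum_zero (t : List String) : gsum t 0 = 0 := by simp [gsum]

theorem gsum_cons (w : String) (t : List String) (k : Nat) :
    gsum (w :: t) (k + 1) = (PySem.Str.len w + 1) + gsum t k := by
  simp [gsum]

theorem gsum_mono (t : List String) (j k : Nat) (h : j ≤ k) : gsum t j ≤ gsum t k := by
  induction t generalizing j k with
  | nil => simp [gsum]
  | cons w t ih =>
    cases j with
    | zero =>
      rw [gsum_zero]
      cases k with
      | zero => rw [gsum_zero]
      | succ k =>
        rw [gsum_cons]
        have h1 := strLen_nonneg w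
        have h2 : gsum t 0 ≤ gsum t k := by rw [gsum_zero] at *; exact le_trans (le_refl 0) (by
          have := ih 0 k (Nat.zero_le k); rwa [gsum_zero] at this)
        have h3 : (0:Int) ≤ gsum t k := by have := ih 0 k (Nat.zero_le k); rwa [gsum_zero] at this
        omega
    | succ j =>
      cases k with
      | zero => omega
      | succ k =>
        rw [gsum_cons, gsum_cons]
        have := ih j k (by omega)
        omega

theorem gsum_nonneg (t : List String) (k : Nat) : 0 ≤ gsum t k := by
  have := gsum_mono t 0 k (Nat.zero_le k)
  rwa [gsum_zero] at this

theorem gsum_eq (t : List String) (k : Nat) (h : k ≤ t.length) :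
    gsum t k = sumLen (t.take k) + (k : Int) := by
  induction t generalizing k with
  | nil => simp at h; subst h; simp [gsum, sumLen]
  | cons w t ih =>
    cases k with
    | zero => simp [gsum, sumLen]
    | succ k =>
      rw [gsum_cons, ih k (by simpa using h)]
      simp [sumLen]
      ring

theorem costF_zero (words : List String) : costF words 0 = 0 := by simp [costF, sumLen]

theorem costF_cons_succ (w : String) (t : List String) (j : Nat) (h : j ≤ t.length) :
    costF (w :: t) (j + 1) = PySem.Str.len w + gsum t j := by
  rw [costF, gsum_eq t j h]
  simp [sumLen]
  ring

-- A's loop once chosen is nonempty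
theorem loopA_tail (width : Int) (t : List String) :
    ∀ (ll : Int) (ch : List String), ch ≠ [] →
    chooseLoopA width t ll ch = ch ++ tailTake (width - ll) t := by
  induction t with
  | nil => intro ll ch _; simp [chooseLoopA, tailTake]
  | cons w t ih =>
    intro ll ch hch
    rw [chooseLoopA]
    simp only [if_neg hch]
    by_cases hfit : PySem.Str.len w + 1 ≤ width - ll
    · have hlt : ll < width := by have := strLen_nonneg w; omega
      rw [if_pos hlt, if_neg (by omega)]
      rw [ih (ll + (PySem.Str.len w + 1)) (ch ++ [w]) (by simp)]
      rw [tailTake, if_pos hfit]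
      simp
      ring_nf
    · rw [tailTake, if_neg hfit]
      by_cases hlt : ll < width
      · rw [if_pos hlt, if_pos (by omega)]; simp
      · rw [if_neg hlt]; simp

theorem A_eq_midA (words : List String) (width : Int) :
    choose_words words width = midA words width := by
  cases words with
  | nil => simp [choose_words, chooseLoopA, midA]
  | cons w t =>
    rw [choose_words, chooseLoopA, midA]
    simp only [reduceIte, List.nil_append]
    by_cases hw : 0 < width
    · rw [if_pos hw]
      by_cases hfit : PySem.Str.len w ≤ width
      · rw [if_neg (by omega), if_pos ⟨hw, hfit⟩]
        rw [loopA_tail width t (0 + PySem.Str.len w) [w] (by simp)]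
        simp
      · rw [if_pos (by omega), if_neg (by rintro ⟨_, h⟩; exact hfit h)]
    · rw [if_neg hw, if_neg (by rintro ⟨h, _⟩; exact hw h)]

-- tailTake is a prefix, fits the budget, and is maximal
theorem tailTake_spec (t : List String) (r : Int) (hr : 0 ≤ r) :
    tailTake r t = t.take (tailTake r t).length ∧
    gsum t (tailTake r t).length ≤ r ∧
    ((tailTake r t).length < t.length → r < gsum t ((tailTake r t).length + 1)) := by
  induction t generalizing r with
  | nil => simp [tailTake, gsum_zero]; exact hr
  | cons w t ih =>
    by_cases hfit : PySem.Str.len w + 1 ≤ r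
    · have hr' : 0 ≤ r - (PySem.Str.len w + 1) := by omega
      obtain ⟨h1, h2, h3⟩ := ih (r - (PySem.Str.len w + 1)) hr'
      rw [tailTake, if_pos hfit]
      refine ⟨?_, ?_, ?_⟩
      · simp only [List.length_cons, List.take_succ_cons]
        exact congrArg (w :: ·) h1
      · simp only [List.length_cons, gsum_cons]
        omega
      · intro hlen
        simp only [List.length_cons] at hlen ⊢
        rw [gsum_cons]
        have := h3 (by omega)
        omega
    · rw [tailTake, if_neg hfit]
      refine ⟨by simp, ?_, ?_⟩
      · simp only [List.length_nil]
        rw [gsum_zero]; exact hr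
      · intro _
        have h0 : gsum (w :: t) (0 + 1) = PySem.Str.len w + 1 + gsum t 0 := gsum_cons w t 0
        simp only [List.length_nil]
        rw [gsum_zero] at h0
        simp only [Nat.zero_add] at h0
        rw [h0]
        omega

-- midA is a prefix of words
theorem midA_prefix (words : List String) (width : Int) (h : 0 < width) :
    midA words width = words.take (midA words width).length := by
  cases words with
  | nil => simp [midA]
  | cons w t =>
    rw [midA]
    by_cases hc : 0 < width ∧ PySem.Str.len w ≤ width
    · rw [if_pos hc]
      have hr : 0 ≤ width - PySem.Str.len w := by omega
      obtain ⟨h1, _, _⟩ := tailTake_spec t (width - PySem.Str.len w) hr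
      simp only [List.length_cons, List.take_succ_cons]
      exact congrArg (w :: ·) h1
    · rw [if_neg hc]; simp

theorem midA_length_le (words : List String) (width : Int) :
    (midA words width).length ≤ words.length := by
  cases words with
  | nil => simp [midA]
  | cons w t =>
    rw [midA]
    by_cases hc : 0 < width ∧ PySem.Str.len w ≤ width
    · rw [if_pos hc]
      have hr : 0 ≤ width - PySem.Str.len w := by omega
      obtain ⟨h1, _, _⟩ := tailTake_spec t (width - PySem.Str.len w) hr
      have : (tailTake (width - PySem.Str.len w) t).length ≤ t.length := by
        have hc := congrArg List.length h1
        simp only [List.length_take] at hc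
        omega
      simpa using this
    · rw [if_neg hc]; simp

-- the cost characterization: k words fit iff k ≤ K (the length of A's answer)
theorem costF_iff (words : List String) (width : Int) (hw : 0 < width) :
    ∀ k, k ≤ words.length → (costF words k ≤ width ↔ k ≤ (midA words width).length) := by
  cases words with
  | nil =>
    intro k hk
    simp at hk; subst hk
    simp [costF_zero, midA]
    omega
  | cons w t =>
    intro k hk
    rw [midA]
    by_cases hc : 0 < width ∧ PySem.Str.len w ≤ width
    · rw [if_pos hc]
      have hr : 0 ≤ width - PySem.Str.len w := by omega
      obtain ⟨h1, h2, h3⟩ := tailTake_spec t (width - PySem.Str.len w) hr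
      set m := (tailTake (width - PySem.Str.len w) t).length with hm
      have hmt : m ≤ t.length := by
        have hc := congrArg List.length h1
        simp only [List.length_take, ← hm] at hc
        omega
      simp only [List.length_cons]
      cases k with
      | zero => rw [costF_zero]; constructor <;> intro <;> omega
      | succ j =>
        have hjt : j ≤ t.length := by simpa using hk
        rw [costF_cons_succ w t j hjt]
        constructor
        · intro hle
          by_contra hgt
          push_neg at hgt
          have hmj : m + 1 ≤ j := by omega
          have hmlt : m < t.length := by omega
          have := h3 hmlt
          have := gsum_mono t (m + 1) j hmj
          omega
        · intro hle
          have hjm : j ≤ m := by omega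
          have := gsum_mono t j m hjm
          omega
    · rw [if_neg hc]
      simp only [List.length_nil]
      have hlw : width < PySem.Str.len w := by
        rcases not_and_or.mp hc with h | h
        · omega
        · omega
      cases k with
      | zero => rw [costF_zero]; constructor <;> intro <;> omega
      | succ j =>
        have hjt : j ≤ t.length := by simpa using hk
        rw [costF_cons_succ w t j hjt]
        have := gsum_nonneg t j
        constructor
        · intro hle; omega
        · intro hle; omega

-- B's table equals the math table
theorem scanTail_eq (t : List String) (a : Int) :
    scanTail a t = (List.range t.length).map (fun j => a + gsum t (j + 1)) := by
  induction t generalizing a with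
  | nil => simp [scanTail]
  | cons w t ih =>
    rw [scanTail, ih (a + PySem.Str.len w + 1)]
    simp only [List.length_cons, List.range_succ_eq_map, List.map_cons, List.map_map]
    refine List.cons_eq_cons.mpr ⟨?_, ?_⟩
    · have h0 := gsum_cons w t 0
      rw [gsum_zero] at h0
      simp only [Nat.zero_add] at h0
      rw [h0]; ring
    · apply List.map_congr_left
      intro j _
      simp only [Function.comp_apply, Nat.succ_eq_add_one]
      have hg := gsum_cons w t (j + 1)
      omega

theorem foldTail (t : List String) :
    ∀ (s : Int), 1 ≤ s → ∀ (acc : List Int) (a : Int),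
    (PySem.List.enumerate t s).foldl
      (fun f p => f ++ [PySem.List.pyGetD f (-1) 0 + PySem.Str.len p.2 + (if p.1 > 0 then 1 else 0)])
      (acc ++ [a])
    = acc ++ a :: scanTail a t := by
  induction t with
  | nil => intro s _ acc a; simp [PySem.List.enumerate_nil, scanTail]
  | cons w t ih =>
    intro s hs acc a
    rw [PySem.List.enumerate_cons, List.foldl_cons]
    have hget : PySem.List.pyGetD (acc ++ [a]) (-1) 0 = a :=
      PySem.List.pyGetD_neg_one_append_singleton acc a 0
    rw [hget, if_pos (by omega)]
    have : acc ++ [a] ++ [a + PySem.Str.len w + 1] = (acc ++ [a]) ++ [a + PySem.Str.len w + 1] := by simp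
    rw [this, ih (s + 1) (by omega) (acc ++ [a]) (a + PySem.Str.len w + 1)]
    simp [scanTail]

theorem cwTable_eq (words : List String) :
    cwTable words = (List.range (words.length + 1)).map (fun k => costF words k) := by
  cases words with
  | nil => simp [cwTable, PySem.List.enumerate_nil, costF_zero]
  | cons w t =>
    rw [cwTable, PySem.List.enumerate_cons, List.foldl_cons]
    have hget : PySem.List.pyGetD ([0] : List Int) (-1) 0 = 0 := by
      simpa using (PySem.List.pyGetD_neg_one_append_singleton ([] : List Int) 0 0)
    rw [hget, if_neg (by omega)]
    simp only [zero_add, add_zero]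
    rw [foldTail t 1 (by omega) [0] (PySem.Str.len w), scanTail_eq]
    have e1 : costF (w :: t) (0 + 1) = PySem.Str.len w := by
      rw [costF_cons_succ w t 0 (Nat.zero_le _), gsum_zero, add_zero]
    simp only [List.singleton_append, List.length_cons, List.range_succ_eq_map,
      List.map_cons, List.map_map]
    refine List.cons_eq_cons.mpr ⟨(costF_zero _).symm, List.cons_eq_cons.mpr ⟨?_, ?_⟩⟩
    · simpa using e1.symm
    · symm
      apply List.map_congr_left
      intro j hj
      simp only [List.mem_range] at hj
      simp only [Function.comp_apply]
      rw [costF_cons_succ w t (j + 1) (by omega)]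

-- binary search returns K when fitting is downward-closed with frontier K
theorem search_eq (f : List Int) (width : Int) (n K : Nat)
    (H : ∀ k, k ≤ n → (PySem.List.pyGetD f (k : Int) 0 ≤ width ↔ k ≤ K)) :
    ∀ d lo hi, hi - lo ≤ d → lo ≤ K → K ≤ hi → hi ≤ n → cwSearch f width lo hi = K := by
  intro d
  induction d with
  | zero =>
    intro lo hi hd hlk hkh hhn
    rw [cwSearch, if_neg (by omega)]
    omega
  | succ d ih =>
    intro lo hi hd hlk hkh hhn
    by_cases hlt : lo < hi
    · rw [cwSearch, if_pos hlt]
      simp only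
      set mid := (lo + hi + 1) / 2 with hmid
      have hb1 : lo < mid := by omega
      have hb2 : mid ≤ hi := by omega
      by_cases hp : PySem.List.pyGetD f (mid : Int) 0 ≤ width
      · rw [if_pos hp]
        have hmK : mid ≤ K := (H mid (by omega)).mp hp
        exact ih mid hi (by omega) hmK hkh hhn
      · rw [if_neg hp]
        have hKm : K < mid := by
          by_contra hcon
          push_neg at hcon
          exact hp ((H mid (by omega)).mpr (by omega))
        exact ih lo (mid - 1) (by omega) hlk (by omega) (by omega)
    · rw [cwSearch, if_neg hlt]
      omega

theorem table_get (words : List String) (k : Nat) (hk : k ≤ words.length) :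
    PySem.List.pyGetD (cwTable words) (k : Int) 0 = costF words k := by
  rw [PySem.List.pyGetD_natCast, cwTable_eq]
  rw [List.getD_eq_getElem?_getD]
  rw [List.getElem?_map]
  rw [List.getElem?_range (by omega)]
  simp

-- ===== VERDICT (by name: the statement is the Claim_ definition above) =====
theorem choose_words_spec : Claim_equal_choose_words := by
  intro words width _
  unfold Spec_choose_words
  rw [A_eq_midA]
  by_cases hw : width ≤ 0
  · rw [choose_words_alt, if_pos hw]
    cases words with
    | nil => simp [midA]
    | cons w t =>
      rw [midA, if_neg (by rintro ⟨h, _⟩; omega)]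
  · push_neg at hw
    rw [choose_words_alt, if_neg (by omega)]
    simp only
    have hK := midA_length_le words width
    have hsearch : cwSearch (cwTable words) width 0 words.length = (midA words width).length := by
      apply search_eq (cwTable words) width words.length (midA words width).length
        (fun k hk => by rw [table_get words k hk]; exact costF_iff words width hw k hk)
        words.length 0 words.length (by omega) (by omega) hK (le_refl _)
    rw [hsearch]
    exact midA_prefix words width hw
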